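-- pv_equiv track=rewrite | github.com/affinitic/cirb.novac | cirb/novac/browser/privateview.py | generate_formatted_keys
-- ===== SOURCE A (Python) =====
-- def generate_formatted_keys(keys):
--     results=[]
--     for key in keys:
--         formatted_key = ''
--         for i in range(len(key['key'])):
--             if i % 4 == 0 and i != 0:
--                 formatted_key += " - "
--             formatted_key += key['key'][i]
--         key['formatted_key'] = formatted_key
--         results.append(key)
--     return results
-- ===== SOURCE B (Python) =====
-- def _fmt(s):
--     if len(s) <= 4:
--         return s
--     return s[:4] + ' - ' + _fmt(s[4:])
--
--
-- def generate_formatted_keys(keys):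
--     for key in keys:
--         key['formatted_key'] = _fmt(key['key'])
--     return list(keys)
-- ===== Notes on version B (the rewrite author's own statement) =====
-- stated objective: simpler
-- what changed: The per-character accumulator loop with a modulo-4 separator guard is replaced by a recursive chunk formatter (first 4 chars + ' - ' + recurse on the rest), and the explicit results accumulator is replaced by mutating each dict in the loop and returning list(keys).
import Mathlib
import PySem

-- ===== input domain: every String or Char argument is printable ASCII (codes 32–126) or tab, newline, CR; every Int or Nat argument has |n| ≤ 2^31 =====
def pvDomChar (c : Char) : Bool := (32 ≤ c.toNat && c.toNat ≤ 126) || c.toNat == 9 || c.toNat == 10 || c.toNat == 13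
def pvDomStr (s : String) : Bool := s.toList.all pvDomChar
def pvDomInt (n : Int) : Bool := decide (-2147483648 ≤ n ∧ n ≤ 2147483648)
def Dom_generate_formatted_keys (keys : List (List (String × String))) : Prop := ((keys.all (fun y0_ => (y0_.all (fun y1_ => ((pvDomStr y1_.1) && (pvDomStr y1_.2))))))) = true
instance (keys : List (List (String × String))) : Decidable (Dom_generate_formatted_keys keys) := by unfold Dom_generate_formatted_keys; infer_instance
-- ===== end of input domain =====

-- B replaces the per-character accumulation with a modulo-4 separator guard by a recursive chunk
-- formatter (first 4 chars + " - " + recurse on the rest) and returns list(keys) instead of an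
-- explicit results accumulator (simpler); B performs the same in-place dict mutation as A, and the
-- equivalence proved is about the return value.

-- shared Python-dict primitives on association lists: d[k] lookup (first match, default) and
-- d[k] = v assignment (overwrite in place keeps position, new key appends)
def pvDictGetD (d : List (String × String)) (k dflt : String) : String :=
  match d with
  | [] => dflt
  | (k', v) :: rest => if k' == k then v else pvDictGetD rest k dflt

def pvDictSet (d : List (String × String)) (k v : String) : List (String × String) :=
  match d with
  | [] => [(k, v)]
  | (k', v') :: rest => if k' == k then (k', v) :: rest else (k', v') :: pvDictSet rest k v

-- ===== PORT A =====
-- inner loop of A: formatted_key built one character at a time, " - " inserted when i % 4 == 0 and i != 0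
def pvFmtA (s : String) : String :=
  String.ofList ((PySem.List.pyRange 0 (PySem.Str.len s) 1).foldl
    (fun fk i =>
      let fk := if PySem.Int.mod i 4 == 0 && i != 0 then fk ++ (' ' :: '-' :: ' ' :: []) else fk
      fk ++ [PySem.List.pyGetD s.toList i ' ']) [])

def generate_formatted_keys (keys : List (List (String × String))) : List (List (String × String)) :=
  keys.foldl (fun results key =>
    results ++ [pvDictSet key "formatted_key" (pvFmtA (pvDictGetD key "key" ""))]) []

-- ===== PORT B =====
-- the separator " - " as a character list
def pvSep : List Char := [' ', '-', ' ']

-- B's recursive _fmt, on the character list of the string: s[:4] = take 4 and s[4:] = drop 4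
-- (exact for these nonnegative slice bounds)
def pvFmtChars (cs : List Char) : List Char :=
  if cs.length ≤ 4 then cs
  else cs.take 4 ++ pvSep ++ pvFmtChars (cs.drop 4)
termination_by cs.length
decreasing_by simp; omega

def generate_formatted_keys_alt (keys : List (List (String × String))) : List (List (String × String)) :=
  keys.map (fun key =>
    pvDictSet key "formatted_key" (String.ofList (pvFmtChars (pvDictGetD key "key" "").toList)))

-- ===== PRECONDITION & SPEC =====
-- Pre_ excludes exactly the inputs on which Python A raises KeyError: a dict without a 'key' entry
-- (B raises the same KeyError there).
def Pre_generate_formatted_keys (keys : List (List (String × String))) : Prop :=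
  (keys.all (fun d => d.any (fun kv => kv.1 == "key"))) = true
instance (keys : List (List (String × String))) : Decidable (Pre_generate_formatted_keys keys) := by unfold Pre_generate_formatted_keys; infer_instance

def pvWitness_generate_formatted_keys : (List (List (String × String))) :=
  [[("key", "abcdefghij")], [("key", "abc"), ("x", "y")]]

def Spec_generate_formatted_keys (keys : List (List (String × String))) (out : List (List (String × String))) : Prop := out = generate_formatted_keys_alt keys
instance (keys : List (List (String × String))) (out : List (List (String × String))) : Decidable (Spec_generate_formatted_keys keys out) := by unfold Spec_generate_formatted_keys; infer_instance

-- ===== CLAIM (what is proved, stated in full; the proofs are below) =====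
def Claim_equal_generate_formatted_keys : Prop := ∀ (keys : List (List (String × String))), Dom_generate_formatted_keys keys → Pre_generate_formatted_keys keys → Spec_generate_formatted_keys keys (generate_formatted_keys keys)

-- ===== LEMMAS AND PROOFS =====

-- nat-indexed reading of A's inner loop
def pvGA (t : List Char) : List Char :=
  (List.range t.length).flatMap
    (fun k => (if k % 4 == 0 && k != 0 then pvSep else []) ++ [t.getD k ' '])

-- A's accumulator loop is a flatMap
lemma pv_foldl_sep (l : List Int) (c : Int → Bool) (sep : List Char) (g : Int → Char)
    (acc : List Char) :
    l.foldl (fun fk i => (if c i then fk ++ sep else fk) ++ [g i]) acc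
      = acc ++ l.flatMap (fun i => (if c i then sep else []) ++ [g i]) := by
  induction l generalizing acc with
  | nil => simp
  | cons x xs ih =>
    simp only [List.foldl_cons, List.flatMap_cons, ih]
    cases c x <;> simp

lemma pv_fmod_cast (k : Nat) : PySem.Int.mod (↑k) 4 = ↑(k % 4) := by
  show Int.fmod _ _ = _
  rw [Int.fmod_eq_emod, if_pos (Or.inl (by norm_num : (0:Int) ≤ 4)), add_zero]
  omega

lemma pvFmtA_toList (s : String) : (pvFmtA s).toList = pvGA s.toList := by
  unfold pvFmtA pvGA
  simp only [String.toList_ofList, PySem.Str.len_eq]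
  rw [pv_foldl_sep _ _ (' ' :: '-' :: ' ' :: []) _ []]
  rw [PySem.List.pyRange_one]
  simp only [List.nil_append, Int.sub_zero, Int.toNat_natCast, List.flatMap_map]
  congr 1
  funext k
  have h1 : (0 : Int) + ↑k = ↑k := by omega
  rw [h1, pv_fmod_cast, PySem.List.pyGetD_natCast]
  have h2 : ((↑(k % 4) : Int) == 0) = ((k % 4) == 0) := by
    cases h : (k % 4) == 0 <;> simp only [beq_iff_eq, beq_eq_false_iff_ne] at h ⊢ <;> omega
  have h3 : ((↑k : Int) != 0) = (k != 0) := by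
    by_cases hk : k = 0
    · subst hk; rfl
    · have hk' : ((k : Int)) ≠ 0 := by exact_mod_cast hk
      simp [bne, hk]
  rw [h2, h3]
  rfl

lemma pvGA_small (t : List Char) (h : t.length ≤ 4) : pvGA t = t := by
  rcases t with _ | ⟨a, _ | ⟨b, _ | ⟨c, _ | ⟨d, t'⟩⟩⟩⟩
  · simp [pvGA]
  · simp [pvGA, List.range_succ, List.getD]
  · simp [pvGA, List.range_succ, List.getD]
  · simp [pvGA, List.range_succ, List.getD]
  · have ht : t' = [] := by
      simp at h
      exact List.eq_nil_of_length_eq_zero (by omega)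
    subst ht
    simp [pvGA, List.range_succ, List.getD]

-- tail-shift of A's body: separator condition at the head of a chunked remainder
lemma pv_flatMap_head (e : Char) (t : List Char) :
    (List.range (e :: t).length).flatMap
        (fun k => (if k % 4 == 0 then pvSep else []) ++ [(e :: t).getD k ' '])
      = pvSep ++ (List.range (e :: t).length).flatMap
          (fun k => (if k % 4 == 0 && k != 0 then pvSep else []) ++ [(e :: t).getD k ' ']) := by
  simp only [List.length_cons, List.range_succ_eq_map, List.flatMap_cons, List.flatMap_map]
  have hbody : (fun k => (if (k + 1) % 4 == 0 then pvSep else []) ++ [(e :: t).getD (k + 1) ' '])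
      = (fun k => (if (k + 1) % 4 == 0 && (k + 1) != 0 then pvSep else []) ++ [(e :: t).getD (k + 1) ' ']) := by
    funext k
    have : ((k + 1) != 0) = true := by simp
    rw [this, Bool.and_true]
  simp only [Nat.succ_eq_add_one, hbody]
  simp [List.getD]

lemma pvGA_step (a b c d e : Char) (t : List Char) :
    pvGA (a :: b :: c :: d :: e :: t) = [a, b, c, d] ++ pvSep ++ pvGA (e :: t) := by
  unfold pvGA
  have hlen : (a :: b :: c :: d :: e :: t).length = 4 + (e :: t).length := by simp only [List.length_cons]; omega
  rw [hlen, List.range_add, List.flatMap_append, List.flatMap_map]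
  have h1 : (List.range 4).flatMap
      (fun k => (if k % 4 == 0 && k != 0 then pvSep else [])
        ++ [(a :: b :: c :: d :: e :: t).getD k ' ']) = [a, b, c, d] := by
    simp [List.range_succ, List.getD]
  rw [h1]
  have h2 : (fun k => (if (4 + k) % 4 == 0 && (4 + k) != 0 then pvSep else [])
        ++ [(a :: b :: c :: d :: e :: t).getD (4 + k) ' '])
      = (fun k => (if k % 4 == 0 then pvSep else []) ++ [(e :: t).getD k ' ']) := by
    funext k
    have hm : (4 + k) % 4 = k % 4 := Nat.add_mod_left 4 k
    have hz : ((4 + k) != 0) = true := by simp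
    have hg : (a :: b :: c :: d :: e :: t).getD (4 + k) ' ' = (e :: t).getD k ' ' := by
      have : 4 + k = k + 1 + 1 + 1 + 1 := by omega
      rw [this]
      simp only [List.getD_cons_succ]
    rw [hm, hz, Bool.and_true, hg]
  rw [h2, pv_flatMap_head]
  simp only [List.append_assoc]

-- B's recursion computes exactly A's inner loop
lemma pvFmtChars_eq_pvGA : ∀ (n : Nat) (cs : List Char), cs.length ≤ n → pvFmtChars cs = pvGA cs := by
  intro n
  induction n with
  | zero =>
    intro cs h
    have : cs = [] := List.eq_nil_of_length_eq_zero (by omega)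
    subst this
    rw [pvFmtChars]
    simp [pvGA]
  | succ n ih =>
    intro cs h
    by_cases hle : cs.length ≤ 4
    · rw [pvFmtChars, if_pos hle, pvGA_small _ hle]
    · rcases cs with _ | ⟨a, _ | ⟨b, _ | ⟨c, _ | ⟨d, _ | ⟨e, t⟩⟩⟩⟩⟩
      · exact absurd (by simp) hle
      · exact absurd (by simp) hle
      · exact absurd (by simp) hle
      · exact absurd (by simp) hle
      · exact absurd (by simp) hle
      rw [pvFmtChars]
      have hgt : ¬ (a :: b :: c :: d :: e :: t).length ≤ 4 := by simp only [List.length_cons]; omega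
      rw [if_neg hgt, pvGA_step]
      have htake : (a :: b :: c :: d :: e :: t).take 4 = [a, b, c, d] := rfl
      have hdrop : (a :: b :: c :: d :: e :: t).drop 4 = e :: t := rfl
      rw [htake, hdrop, ih (e :: t) (by simp at h ⊢; omega)]

-- A's results accumulator is a map
lemma pv_foldl_map (f : List (String × String) → List (String × String))
    (l : List (List (String × String))) (acc : List (List (String × String))) :
    l.foldl (fun results key => results ++ [f key]) acc = acc ++ l.map f := by
  induction l generalizing acc with
  | nil => simp
  | cons x xs ih => simp [ih]

lemma pvFmtA_eq (s : String) : pvFmtA s = String.ofList (pvFmtChars s.toList) := by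
  rw [← String.toList_inj, pvFmtA_toList, String.toList_ofList,
    pvFmtChars_eq_pvGA s.toList.length _ le_rfl]

-- ===== VERDICT (by name: the statement is the Claim_ definition above) =====
theorem generate_formatted_keys_spec : Claim_equal_generate_formatted_keys := by
  intro keys _ _
  unfold Spec_generate_formatted_keys generate_formatted_keys generate_formatted_keys_alt
  rw [pv_foldl_map]
  simp only [List.nil_append, pvFmtA_eq]
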